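-- pv_equiv track=rewrite | github.com/bp-pet/advent-of-code2023 | day12.py | replace_questions
-- ===== SOURCE A (Python) =====
-- def replace_questions(line, selected):
--     """
--     Replace the question marks of a line with a mask that is the indexed of the selected.
--     Returns a new line without the question marks.
--     """
--     counter = 0
--     temp = ""
--     for c in line[0]:
--         if c == "?":
--             temp += "#" if counter in selected else "."
--             counter += 1
--         else:
--             temp += c
--     new_line = (temp, line[1])
--     return new_line
-- ===== SOURCE B (Python) =====
-- def replace_questions(line, selected):
--     """
--     Replace the question marks of a line with a mask that is the indexed of the selected.
--     Returns a new line without the question marks.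
--     """
--     s = line[0]
--     qpos = [i for i, c in enumerate(s) if c == "?"]
--     chars = list(s)
--     for j, p in enumerate(qpos):
--         chars[p] = "#" if j in selected else "."
--     return ("".join(chars), line[1])
-- ===== Notes on version B (the rewrite author's own statement) =====
-- stated objective: alternative
-- what changed: Instead of one inline scan building the output string char-by-char with a running '?' counter, B first collects the positions of all '?' (one enumerate pass), then overwrites exactly those positions in a mutable char list keyed by each '?''s ordinal, and joins.
import Mathlib
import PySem

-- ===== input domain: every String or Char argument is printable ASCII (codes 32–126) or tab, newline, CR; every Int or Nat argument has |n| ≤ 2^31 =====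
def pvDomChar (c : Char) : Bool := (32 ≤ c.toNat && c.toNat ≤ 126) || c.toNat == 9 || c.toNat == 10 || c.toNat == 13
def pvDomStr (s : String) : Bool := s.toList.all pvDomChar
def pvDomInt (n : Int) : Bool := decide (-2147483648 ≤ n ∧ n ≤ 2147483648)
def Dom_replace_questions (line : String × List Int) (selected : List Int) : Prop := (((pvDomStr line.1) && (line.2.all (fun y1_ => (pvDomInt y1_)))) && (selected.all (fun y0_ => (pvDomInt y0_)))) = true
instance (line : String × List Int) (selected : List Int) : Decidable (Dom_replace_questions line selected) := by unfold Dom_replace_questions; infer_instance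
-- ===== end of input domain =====

-- B replaces A's single counter-carrying scan by an index-building pass ('?' positions) plus a targeted in-place replacement pass; same results, similar cost.


-- ===== PORT A =====
def replace_questions (line : String × List Int) (selected : List Int) : String × List Int :=
  -- counter = 0; temp = ""; for c in line[0]: …  (temp kept as a List Char, joined at the end)
  let st := line.1.toList.foldl
    (fun (st : Int × List Char) c =>
      if c = '?' then (st.1 + 1, st.2 ++ [if st.1 ∈ selected then '#' else '.'])
      else (st.1, st.2 ++ [c]))
    (0, [])
  (String.ofList st.2, line.2)

-- ===== PORT B =====
def replace_questions_alt (line : String × List Int) (selected : List Int) : String × List Int :=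
  let s := line.1.toList
  -- qpos = [i for i, c in enumerate(s) if c == "?"]
  let qpos := ((PySem.List.enumerate s 0).filter (fun ic => ic.2 == '?')).map (fun ic => ic.1)
  -- for j, p in enumerate(qpos): chars[p] = "#" if j in selected else "."
  -- (p is a nonnegative enumerate index, so .toNat is exact here)
  let chars := (PySem.List.enumerate qpos 0).foldl
    (fun ch (jp : Int × Int) => ch.set jp.2.toNat (if jp.1 ∈ selected then '#' else '.')) s
  (String.ofList chars, line.2)

-- ===== PRECONDITION & SPEC =====
def Spec_replace_questions (line : String × List Int) (selected : List Int) (out : String × List Int) : Prop := out = replace_questions_alt line selected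
instance (line : String × List Int) (selected : List Int) (out : String × List Int) : Decidable (Spec_replace_questions line selected out) := by unfold Spec_replace_questions; infer_instance

-- ===== CLAIM (what is proved, stated in full; the proofs are below) =====
def Claim_equal_replace_questions : Prop := ∀ (line : String × List Int) (selected : List Int), Dom_replace_questions line selected → Spec_replace_questions line selected (replace_questions line selected)

-- ===== LEMMAS AND PROOFS =====

-- the common characterisation: what both programs compute
def pvR (selected : List Int) : List Char → Int → List Char
  | [], _ => []
  | c :: t, j =>
      if c = '?' then (if j ∈ selected then '#' else '.') :: pvR selected t (j + 1)
      else c :: pvR selected t j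

-- the list of '?'-positions of s, counted from k (B's qpos when k = 0)
def pvQ (s : List Char) (k : Int) : List Int :=
  ((PySem.List.enumerate s k).filter (fun ic => ic.2 == '?')).map (fun ic => ic.1)

lemma pvA_eq (selected : List Int) : ∀ (s : List Char) (k : Int) (acc : List Char),
    (s.foldl
      (fun (st : Int × List Char) c =>
        if c = '?' then (st.1 + 1, st.2 ++ [if st.1 ∈ selected then '#' else '.'])
        else (st.1, st.2 ++ [c]))
      (k, acc)).2 = acc ++ pvR selected s k := by
  intro s
  induction s with
  | nil => intro k acc; simp [pvR]
  | cons c t ih =>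
      intro k acc
      by_cases hc : c = '?' <;> simp [pvR, hc, ih]

lemma pvEnum_map {α β : Type} (f : α → β) : ∀ (l : List α) (k : Int),
    PySem.List.enumerate (l.map f) k = (PySem.List.enumerate l k).map (fun p => (p.1, f p.2)) := by
  intro l
  induction l with
  | nil => intro k; simp [PySem.List.enumerate_nil]
  | cons x t ih => intro k; simp [PySem.List.enumerate_cons, ih (k + 1)]

lemma pvQ_cons (c : Char) (t : List Char) (k : Int) :
    pvQ (c :: t) k = (if c = '?' then [k] else []) ++ pvQ t (k + 1) := by
  by_cases hc : c = '?' <;> simp [pvQ, PySem.List.enumerate_cons, hc]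

lemma pvQ_shift : ∀ (s : List Char) (k : Int), pvQ s (k + 1) = (pvQ s k).map (fun x => x + 1) := by
  intro s
  induction s with
  | nil => intro k; simp [pvQ, PySem.List.enumerate_nil]
  | cons c t ih =>
      intro k
      rw [pvQ_cons, pvQ_cons, ih (k + 1), List.map_append]
      by_cases hc : c = '?' <;> simp [hc]


lemma pvQ_nonneg : ∀ (s : List Char) (k : Int) (x : Int), x ∈ pvQ s k → k ≤ x := by
  intro s
  induction s with
  | nil => intro k x hx; simp [pvQ, PySem.List.enumerate_nil] at hx
  | cons c t ih =>
      intro k x hx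
      rw [pvQ_cons] at hx
      rcases List.mem_append.1 hx with h | h
      · by_cases hc : c = '?'
        · simp [hc] at h; omega
        · simp [hc] at h
      · have := ih (k + 1) x h; omega

lemma pvShiftFold (m : Int → Char) : ∀ (pr : List (Int × Int)) (s : List Char) (c : Char),
    (∀ q ∈ pr, 0 ≤ q.2) →
    (pr.map (fun q => (q.1, q.2 + 1))).foldl
        (fun ch (jp : Int × Int) => ch.set jp.2.toNat (m jp.1)) (c :: s)
      = c :: pr.foldl (fun ch (jp : Int × Int) => ch.set jp.2.toNat (m jp.1)) s := by
  intro pr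
  induction pr with
  | nil => intro s c _; simp
  | cons q t ih =>
      intro s c hpos
      have hq : 0 ≤ q.2 := hpos q (List.mem_cons_self)
      have hnat : (q.2 + 1).toNat = q.2.toNat + 1 := by omega
      simp only [List.map_cons, List.foldl_cons, hnat, List.set]
      exact ih _ c (fun p hp => hpos p (List.mem_cons_of_mem _ hp))

lemma pvEnum_snd_mem {α : Type} {l : List α} {k : Int} {p : Int × α}
    (hp : p ∈ PySem.List.enumerate l k) : p.2 ∈ l := by
  rcases (PySem.List.mem_enumerate_iff _ _ _).1 hp with ⟨n, hn, rfl⟩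
  exact List.getElem_mem hn

lemma pvB_eq (selected : List Int) : ∀ (s : List Char) (j0 : Int),
    (PySem.List.enumerate (pvQ s 0) j0).foldl
        (fun ch (jp : Int × Int) => ch.set jp.2.toNat (if jp.1 ∈ selected then '#' else '.')) s
      = pvR selected s j0 := by
  intro s
  induction s with
  | nil => intro j0; simp [pvQ, pvR, PySem.List.enumerate_nil]
  | cons c t ih =>
      intro j0
      have hpos : ∀ (j1 : Int), ∀ q ∈ PySem.List.enumerate (pvQ t 0) j1, 0 ≤ (q : Int × Int).2 :=
        fun j1 q hq => pvQ_nonneg t 0 q.2 (pvEnum_snd_mem hq)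
      by_cases hc : c = '?'
      · subst hc
        rw [pvQ_cons, if_pos rfl, List.singleton_append, pvQ_shift t 0,
            PySem.List.enumerate_cons, List.foldl_cons]
        have hset : ((('?' : Char) :: t).set ((0 : Int)).toNat
            (if j0 ∈ selected then '#' else '.')) =
            (if j0 ∈ selected then '#' else '.') :: t := rfl
        rw [hset, pvEnum_map (fun x => x + 1) (pvQ t 0) (j0 + 1),
            pvShiftFold (fun j => if j ∈ selected then '#' else '.') _ _ _ (hpos (j0 + 1)),
            ih (j0 + 1)]
        simp [pvR]
      · rw [pvQ_cons, if_neg hc, List.nil_append, pvQ_shift t 0,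
            pvEnum_map (fun x => x + 1) (pvQ t 0) j0,
            pvShiftFold (fun j => if j ∈ selected then '#' else '.') _ _ _ (hpos j0),
            ih j0]
        simp [pvR, hc]

-- ===== VERDICT (by name: the statement is the Claim_ definition above) =====
theorem replace_questions_spec : Claim_equal_replace_questions := by
  intro line selected _
  unfold Spec_replace_questions replace_questions replace_questions_alt
  simp only
  rw [pvA_eq selected line.1.toList 0 []]
  rw [show ((PySem.List.enumerate line.1.toList 0).filter (fun ic => ic.2 == '?')).map (fun ic => ic.1) = pvQ line.1.toList 0 from rfl]
  rw [pvB_eq selected line.1.toList 0]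
  simp
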